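-- pv_equiv track=rewrite | github.com/Floepke/PianoScript_text | PianoScript.py | special_string_change_tool
-- ===== SOURCE A (Python) =====
-- def special_string_change_tool(string, startbracket, endbracket):
--
--     def replacer(s, newstring, index, nofail=False):
--         # raise an error if index is outside of the string
--         if not nofail and index not in range(len(s)):
--             raise ValueError("index outside given string")
--
--         # if not erroring, but the index is still not in the correct range..
--         if index < 0:  # add it to the beginning
--             return newstring + s
--         if index > len(s):  # add it to the end
--             return s + newstring
--
--         # insert the new string between "slices" of the original
--         return s[:index] + newstring + s[index + 1:]
--
--     findex = -1
--     for sym in string: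
--         findex += 1
--         if sym == startbracket:
--             rindex = findex
--             for i in string[findex+1:]:
--                 rindex += 1
--                 if i == endbracket:
--                     break
--                 else:
--                     string = replacer(string, "*", rindex)
--     return string
-- ===== SOURCE B (Python) =====
-- def special_string_change_tool(string, startbracket, endbracket):
--     out = []
--     inside = False
--     for ch in string:
--         if inside:
--             if ch == endbracket:
--                 out.append(ch)
--                 inside = (ch == startbracket)
--             else:
--                 out.append('*')
--         else:
--             out.append(ch)
--             inside = (ch == startbracket)
--     return ''.join(out)
-- ===== Notes on version B (the rewrite author's own statement) =====
-- stated objective: alternative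
-- what changed: Replaced A's nested rescans with repeated full-string splicing (string = s[:i] + '*' + s[i+1:] for each starred char) by a single left-to-right pass that keeps an inside-bracket flag and builds the output list once.
import Mathlib
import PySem

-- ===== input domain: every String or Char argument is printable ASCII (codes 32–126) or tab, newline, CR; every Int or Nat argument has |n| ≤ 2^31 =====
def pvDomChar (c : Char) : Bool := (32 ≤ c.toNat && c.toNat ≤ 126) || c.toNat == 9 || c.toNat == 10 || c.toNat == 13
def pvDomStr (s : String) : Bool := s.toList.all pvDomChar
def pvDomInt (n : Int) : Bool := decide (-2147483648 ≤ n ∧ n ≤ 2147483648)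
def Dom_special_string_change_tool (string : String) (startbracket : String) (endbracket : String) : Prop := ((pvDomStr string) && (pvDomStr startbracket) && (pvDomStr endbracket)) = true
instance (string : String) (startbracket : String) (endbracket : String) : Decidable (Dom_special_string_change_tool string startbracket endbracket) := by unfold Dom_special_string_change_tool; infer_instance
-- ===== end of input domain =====

-- B replaces A's rescan-and-rebuild (an inner scan that splices a fresh string per starred
-- char) by a single left-to-right pass with an 'inside-bracket' flag; objective: alternative.

-- ===== PORT A =====
-- Python compares a 1-char string `sym`/`i` against the bracket argument
def pvChEq (c : Char) (b : String) : Bool := b.toList == [c]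

-- `replacer(s, "*", index)` (nofail is always False at the call site); none = the ValueError branch
def pvReplacer (s : List Char) (newstring : List Char) (index : Int) : Option (List Char) :=
  if ¬ (0 ≤ index ∧ index < (s.length : Int)) then none   -- raise ValueError
  else if index < 0 then some (newstring ++ s)
  else if index > (s.length : Int) then some (s ++ newstring)
  else some (s.take index.toNat ++ newstring ++ s.drop (index.toNat + 1))

-- the inner `for i in string[findex+1:]` loop: state = (rindex, current string)
def pvInner (eb : String) : List Char → Int → List Char → Option (List Char)
  | [], _, cur => some cur
  | i :: rest, rindex, cur =>
      let r := rindex + 1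
      if pvChEq i eb then some cur
      else
        match pvReplacer cur ['*'] r with
        | some cur' => pvInner eb rest r cur'
        | none => none

-- the outer `for sym in string` loop: iterates over the ORIGINAL string (Python's iterator is
-- fixed at loop entry) while `cur` is the rebound `string`
def pvOuter (sb eb : String) : List Char → Int → List Char → Option (List Char)
  | [], _, cur => some cur
  | sym :: rest, findex, cur =>
      let f := findex + 1
      if pvChEq sym sb then
        match pvInner eb (PySem.List.slice cur (some (f + 1)) none) f cur with
        | some cur' => pvOuter sb eb rest f cur'
        | none => none
      else pvOuter sb eb rest f cur

def special_string_change_tool (string : String) (startbracket : String) (endbracket : String) : String :=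
  match pvOuter startbracket endbracket string.toList (-1) string.toList with
  | some l => String.ofList l
  | none => ""   -- unreachable: every replacer index is in range (Python never raises here)

-- ===== PORT B =====
def pvStepB (sb eb : String) (st : List Char × Bool) (ch : Char) : List Char × Bool :=
  if st.2 then
    if pvChEq ch eb then (st.1 ++ [ch], pvChEq ch sb)
    else (st.1 ++ ['*'], true)
  else (st.1 ++ [ch], pvChEq ch sb)

def special_string_change_tool_alt (string : String) (startbracket : String) (endbracket : String) : String :=
  String.ofList ((string.toList.foldl (pvStepB startbracket endbracket) ([], false)).1)

-- ===== PRECONDITION & SPEC =====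
def Spec_special_string_change_tool (string : String) (startbracket : String) (endbracket : String) (out : String) : Prop := out = special_string_change_tool_alt string startbracket endbracket
instance (string : String) (startbracket : String) (endbracket : String) (out : String) : Decidable (Spec_special_string_change_tool string startbracket endbracket out) := by unfold Spec_special_string_change_tool; infer_instance

-- ===== CLAIM (what is proved, stated in full; the proofs are below) =====
def Claim_equal_special_string_change_tool : Prop := ∀ (string : String) (startbracket : String) (endbracket : String), Dom_special_string_change_tool string startbracket endbracket → Spec_special_string_change_tool string startbracket endbracket (special_string_change_tool string startbracket endbracket)

-- ===== LEMMAS AND PROOFS =====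

-- the one-pass automaton as a recursion (bridges B's foldl and characterises A's result)
def pvStarRun (sb eb : String) : List Char → Bool → List Char
  | [], _ => []
  | c :: r, inside =>
      if inside then
        if pvChEq c eb then c :: pvStarRun sb eb r (pvChEq c sb)
        else '*' :: pvStarRun sb eb r true
      else c :: pvStarRun sb eb r (pvChEq c sb)

-- the tail of A's current string while inside an open bracket region: stars up to the closer
def pvCover (eb : String) : List Char → List Char
  | [] => []
  | c :: r => if pvChEq c eb then c :: r else '*' :: pvCover eb r

lemma foldlB_eq (sb eb : String) (l : List Char) : ∀ (acc : List Char) (ins : Bool),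
    (l.foldl (pvStepB sb eb) (acc, ins)).1 = acc ++ pvStarRun sb eb l ins := by
  induction l with
  | nil => intro acc ins; simp [pvStarRun]
  | cons c r ih =>
      intro acc ins
      simp only [List.foldl_cons, pvStepB, pvStarRun]
      cases ins <;> by_cases he : pvChEq c eb <;> simp [he, ih]

lemma replacer_set (p q : List Char) (x : Char) :
    pvReplacer (p ++ x :: q) ['*'] (p.length : Int) = some (p ++ '*' :: q) := by
  have h1 : (0:Int) ≤ (p.length : Int) ∧ (p.length : Int) < ((p ++ x :: q).length : Int) := by
    constructor
    · exact Int.natCast_nonneg _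
    · simp [List.length_append]
  unfold pvReplacer
  rw [if_neg (by exact not_not_intro h1)]
  rw [if_neg (by omega), if_neg (by omega)]
  have ht : ((p.length : Int)).toNat = p.length := Int.toNat_natCast _
  rw [ht]
  have htake : (p ++ x :: q).take p.length = p := List.take_left
  have hdrop : (p ++ x :: q).drop (p.length + 1) = q := by simp
  rw [htake, hdrop]
  simp

lemma inner_star (eb : String) : ∀ (u fin : List Char) (c0 : Char),
    pvInner eb u (fin.length : Int) (fin ++ c0 :: u) = some (fin ++ c0 :: pvCover eb u) := by
  intro u
  induction u with
  | nil => intro fin c0; simp [pvInner, pvCover]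
  | cons c' u' ih =>
      intro fin c0
      by_cases he : pvChEq c' eb
      · simp [pvInner, he, pvCover]
      · have hcur : fin ++ c0 :: c' :: u' = (fin ++ [c0]) ++ c' :: u' := by simp
        have hlen : (fin.length : Int) + 1 = ((fin ++ [c0]).length : Int) := by
          simp [List.length_append]
        simp only [pvInner, he, if_false, Bool.false_eq_true]
        rw [hcur, hlen, replacer_set (fin ++ [c0]) u' c']
        have := ih (fin ++ [c0]) '*'
        simp only [this]
        simp [pvCover, he]

lemma inner_noop (eb : String) : ∀ (u fin : List Char),
    pvInner eb (pvCover eb u) (fin.length : Int) (fin ++ '*' :: pvCover eb u)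
      = some (fin ++ '*' :: pvCover eb u) := by
  intro u
  induction u with
  | nil => intro fin; simp [pvInner, pvCover]
  | cons c' u' ih =>
      intro fin
      by_cases he : pvChEq c' eb
      · simp [pvCover, pvInner, he]
      · simp only [pvCover, he, if_false, Bool.false_eq_true]
        by_cases hs : pvChEq '*' eb
        · simp [pvInner, hs]
        · have hcur : fin ++ '*' :: '*' :: pvCover eb u' = (fin ++ ['*']) ++ '*' :: pvCover eb u' := by simp
          have hlen : (fin.length : Int) + 1 = ((fin ++ ['*']).length : Int) := by
            simp [List.length_append]
          simp only [pvInner, hs, if_false, Bool.false_eq_true]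
          rw [hcur, hlen, replacer_set (fin ++ ['*']) (pvCover eb u') '*']
          have h3 := ih (fin ++ ['*'])
          simp only [h3]

lemma drop_succ_append (fin t : List Char) (x : Char) :
    List.drop (fin.length + 1) (fin ++ x :: t) = t := by
  simp

lemma outer_main (sb eb : String) : ∀ (rest fin : List Char) (inside : Bool),
    pvOuter sb eb rest ((fin.length : Int) - 1)
        (fin ++ (if inside then pvCover eb rest else rest))
      = some (fin ++ pvStarRun sb eb rest inside) := by
  intro rest
  induction rest with
  | nil => intro fin inside; cases inside <;> simp [pvOuter, pvCover, pvStarRun]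
  | cons c r ih =>
      intro fin inside
      have hf : (fin.length : Int) - 1 + 1 = (fin.length : Int) := by ring
      have hslice : ∀ (x : Char) (t : List Char),
          PySem.List.slice (fin ++ x :: t) (some ((fin.length : Int) + 1)) none = t := by
        intro x t
        have h1 : (fin.length : Int) + 1 = ((fin.length + 1 : Nat) : Int) := by push_cast; ring
        rw [h1, PySem.List.slice_from_natCast]
        exact drop_succ_append fin t x
      have hlen1 : ∀ (x : Char), ((fin ++ [x]).length : Int) - 1 = (fin.length : Int) := by
        intro x; simp [List.length_append]
      cases inside with
      | false =>
          simp only [if_false, Bool.false_eq_true, pvOuter, hf]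
          by_cases hs : pvChEq c sb
          · rw [if_pos hs, hslice c r, inner_star eb r fin c]
            have hcur : fin ++ c :: pvCover eb r = (fin ++ [c]) ++ (if true then pvCover eb r else r) := by simp
            rw [hcur]
            have h2 := ih (fin ++ [c]) true
            rw [hlen1 c] at h2
            simp only [if_true] at h2 ⊢
            rw [h2]
            simp [pvStarRun, hs]
          · rw [if_neg hs]
            have hcur : fin ++ c :: r = (fin ++ [c]) ++ r := by simp
            have h2 := ih (fin ++ [c]) false
            rw [hlen1 c] at h2
            simp only [if_false, Bool.false_eq_true] at h2
            rw [hcur, h2]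
            simp [pvStarRun, hs]
      | true =>
          by_cases he : pvChEq c eb
          · -- the cover stops right here: current tail is c :: r
            simp only [if_true, pvCover, he, pvOuter, hf]
            by_cases hs : pvChEq c sb
            · rw [if_pos hs, hslice c r, inner_star eb r fin c]
              have hcur : fin ++ c :: pvCover eb r = (fin ++ [c]) ++ (if true then pvCover eb r else r) := by simp
              rw [hcur]
              have h2 := ih (fin ++ [c]) true
              rw [hlen1 c] at h2
              simp only [if_true] at h2 ⊢
              rw [h2]
              simp [pvStarRun, he, hs]
            · rw [if_neg hs]
              have hcur : fin ++ c :: r = (fin ++ [c]) ++ r := by simp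
              have h2 := ih (fin ++ [c]) false
              rw [hlen1 c] at h2
              simp only [if_false, Bool.false_eq_true] at h2
              rw [hcur, h2]
              simp [pvStarRun, he, hs]
          · -- still inside: current tail is '*' :: pvCover eb r
            simp only [if_true, pvCover, he, if_false, Bool.false_eq_true, pvOuter, hf]
            by_cases hs : pvChEq c sb
            · rw [if_pos hs, hslice '*' (pvCover eb r), inner_noop eb r fin]
              have hcur : fin ++ '*' :: pvCover eb r = (fin ++ ['*']) ++ (if true then pvCover eb r else r) := by simp
              rw [hcur]
              have h2 := ih (fin ++ ['*']) true
              rw [hlen1 '*'] at h2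
              simp only [if_true] at h2 ⊢
              rw [h2]
              simp [pvStarRun, he]
            · rw [if_neg hs]
              have hcur : fin ++ '*' :: pvCover eb r = (fin ++ ['*']) ++ pvCover eb r := by simp
              have h2 := ih (fin ++ ['*']) true
              rw [hlen1 '*'] at h2
              simp only [if_true] at h2
              rw [hcur, h2]
              simp [pvStarRun, he]

-- ===== VERDICT (by name: the statement is the Claim_ definition above) =====
theorem special_string_change_tool_spec : Claim_equal_special_string_change_tool := by
  intro s sb eb _
  unfold Spec_special_string_change_tool special_string_change_tool special_string_change_tool_alt
  have h := outer_main sb eb s.toList [] false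
  simp only [List.length_nil, List.nil_append, if_false, Bool.false_eq_true] at h
  norm_num at h
  rw [h, foldlB_eq sb eb s.toList [] false]
  simp
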